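-- pv_equiv track=rewrite | github.com/ppondeu/Basecamp-Casebamp-Clone | organization.py | check_timedelta_skip_month
-- ===== SOURCE A (Python) =====
-- def check_timedelta_skip_month(between_dates):
--     status = ""
--     focus_month_dates, next_month_dates = [], []
--     for i in range(len(between_dates)):
--         if between_dates[i] < between_dates[i - 1] and i != 0:
--             status = "next"
--         if status == "next":
--             next_month_dates.append(between_dates[i])
--         elif status == "":
--             focus_month_dates.append(between_dates[i])
--     return focus_month_dates, next_month_dates
-- ===== SOURCE B (Python) =====
-- def check_timedelta_skip_month(between_dates):
--     split = next((i for i in range(1, len(between_dates))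
--                   if between_dates[i] < between_dates[i - 1]),
--                  len(between_dates))
--     return between_dates[:split], between_dates[split:]
-- ===== Notes on version B (the rewrite author's own statement) =====
-- stated objective: simpler
-- what changed: Replaces the sticky status-flag classification loop that appends each element to one of two lists with a detect-the-first-descent-index search followed by two slices.
import Mathlib
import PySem

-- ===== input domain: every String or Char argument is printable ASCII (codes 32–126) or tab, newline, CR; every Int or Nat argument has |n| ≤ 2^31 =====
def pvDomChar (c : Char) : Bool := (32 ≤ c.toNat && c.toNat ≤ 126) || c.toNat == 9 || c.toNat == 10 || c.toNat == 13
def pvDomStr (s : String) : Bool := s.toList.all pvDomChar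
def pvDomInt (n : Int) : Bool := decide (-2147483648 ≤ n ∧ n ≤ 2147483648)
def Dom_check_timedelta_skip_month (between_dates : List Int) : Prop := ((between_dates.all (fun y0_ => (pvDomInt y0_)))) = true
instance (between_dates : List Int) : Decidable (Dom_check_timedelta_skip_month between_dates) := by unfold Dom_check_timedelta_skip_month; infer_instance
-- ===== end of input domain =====

-- B replaces A's sticky status-flag classification loop with a find-the-first-descent-index
-- search followed by two slices (objective: simpler).

-- ===== PORT A =====
-- loop state: (status, focus_month_dates, next_month_dates)
def check_timedelta_skip_month (between_dates : List Int) : List Int × List Int :=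
  let st := (PySem.List.pyRange 0 between_dates.length 1).foldl
    (fun (s : String × List Int × List Int) i =>
      let status :=
        if PySem.List.pyGetD between_dates i 0 < PySem.List.pyGetD between_dates (i - 1) 0 ∧ i ≠ 0
        then "next" else s.1
      if status = "next" then (status, s.2.1, s.2.2 ++ [PySem.List.pyGetD between_dates i 0])
      else if status = "" then (status, s.2.1 ++ [PySem.List.pyGetD between_dates i 0], s.2.2)
      else (status, s.2.1, s.2.2))
    ("", [], [])
  (st.2.1, st.2.2)

-- ===== PORT B =====
def check_timedelta_skip_month_alt (between_dates : List Int) : List Int × List Int :=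
  let split : Int :=
    match (PySem.List.pyRange 1 between_dates.length 1).find?
        (fun i => decide (PySem.List.pyGetD between_dates i 0 < PySem.List.pyGetD between_dates (i - 1) 0)) with
    | some i => i
    | none => between_dates.length
  (PySem.List.slice between_dates none (some split), PySem.List.slice between_dates (some split) none)

-- ===== PRECONDITION & SPEC =====
def Spec_check_timedelta_skip_month (between_dates : List Int) (out : List Int × List Int) : Prop := out = check_timedelta_skip_month_alt between_dates
instance (between_dates : List Int) (out : List Int × List Int) : Decidable (Spec_check_timedelta_skip_month between_dates out) := by unfold Spec_check_timedelta_skip_month; infer_instance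

-- ===== CLAIM (what is proved, stated in full; the proofs are below) =====
def Claim_equal_check_timedelta_skip_month : Prop := ∀ (between_dates : List Int), Dom_check_timedelta_skip_month between_dates → Spec_check_timedelta_skip_month between_dates (check_timedelta_skip_month between_dates)

-- ===== LEMMAS AND PROOFS =====

-- first descent index among indices [1, n): minimal i with xs[i] < xs[i-1], else n
def fdK (xs : List Int) : Nat → Nat
| 0 => 0
| n + 1 =>
  if fdK xs n < n then fdK xs n
  else if n ≠ 0 ∧ xs[n]?.getD 0 < xs[n - 1]?.getD 0 then n else n + 1

theorem fdK_le (xs : List Int) (n : Nat) : fdK xs n ≤ n := by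
  induction n with
  | zero => simp [fdK]
  | succ n ih => unfold fdK; split_ifs <;> omega

theorem fdK_eq_of_not_lt (xs : List Int) (n : Nat) (h : ¬ fdK xs n < n) : fdK xs n = n := by
  have := fdK_le xs n; omega

-- A's loop invariant over the first n indices
theorem loopA_inv (xs : List Int) (n : Nat) (hn : n ≤ xs.length) :
    (PySem.List.pyRange 0 n 1).foldl
      (fun (s : String × List Int × List Int) i =>
        let status :=
          if PySem.List.pyGetD xs i 0 < PySem.List.pyGetD xs (i - 1) 0 ∧ i ≠ 0
          then "next" else s.1
        if status = "next" then (status, s.2.1, s.2.2 ++ [PySem.List.pyGetD xs i 0])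
        else if status = "" then (status, s.2.1 ++ [PySem.List.pyGetD xs i 0], s.2.2)
        else (status, s.2.1, s.2.2))
      ("", [], [])
    = ((if fdK xs n < n then "next" else ""),
       xs.take (fdK xs n), (xs.take n).drop (fdK xs n)) := by
  induction n with
  | zero => simp [PySem.List.pyRange_one_eq_nil, fdK]
  | succ n ih =>
    have hn' : n ≤ xs.length := by omega
    have hlt : n < xs.length := by omega
    rw [show ((n + 1 : Nat) : Int) = (n : Int) + 1 by push_cast; ring]
    rw [PySem.List.pyRange_one_succ_right (by positivity), List.foldl_append, ih hn']
    have hget : PySem.List.pyGetD xs (n : Int) 0 = xs[n]?.getD 0 := by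
      simp [PySem.List.pyGetD_natCast, List.getD_eq_getElem?_getD]
    have htake : xs.take (n + 1) = xs.take n ++ [xs[n]?.getD 0] := by
      rw [List.take_add_one]
      simp [List.getElem?_eq_getElem hlt]
    have hlen : (xs.take n).length = n := by simp [List.length_take]; omega
    by_cases h0 : n = 0
    · subst h0
      simp only [List.foldl_cons, List.foldl_nil]
      simp [fdK, htake, PySem.List.pyGetD_zero, List.getD_eq_getElem?_getD]
    · have hcast : ((n : Int) - 1) = ((n - 1 : Nat) : Int) := by
        have : 1 ≤ n := Nat.one_le_iff_ne_zero.mpr h0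
        push_cast [this]; ring
      have hget' : PySem.List.pyGetD xs ((n : Int) - 1) 0 = xs[n - 1]?.getD 0 := by
        rw [hcast]; simp [PySem.List.pyGetD_natCast, List.getD_eq_getElem?_getD]
      simp only [List.foldl_cons, List.foldl_nil, hget, hget']
      have hne : ((n : Int) ≠ 0) := by exact_mod_cast h0
      by_cases hK : fdK xs n < n
      · -- already "next": stays next, append to next list
        have hKs : fdK xs (n + 1) = fdK xs n := by simp [fdK, hK]
        have hdrop : (xs.take (n + 1)).drop (fdK xs n)
            = (xs.take n).drop (fdK xs n) ++ [xs[n]?.getD 0] := by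
          rw [htake, List.drop_append_of_le_length (show fdK xs n ≤ (xs.take n).length by omega)]
        simp [hK, hKs, hdrop]
        omega
      · have hKn : fdK xs n = n := fdK_eq_of_not_lt xs n hK
        simp only [if_neg hK]
        by_cases hd : xs[n]?.getD 0 < xs[n - 1]?.getD 0
        · have hKs : fdK xs (n + 1) = n := by simp [fdK, hK, h0, hd]
          have hdrop : (xs.take (n + 1)).drop n = [xs[n]?.getD 0] := by
            rw [htake, List.drop_append_of_le_length (show n ≤ (xs.take n).length by omega),
              List.drop_of_length_le (show (xs.take n).length ≤ n by omega)]
            simp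
          simp [hd, h0, hKs, hKn, hdrop]
        · have hKs : fdK xs (n + 1) = n + 1 := by simp [fdK, hK, h0, hd]
          have hdrop : (xs.take (n + 1)).drop (n + 1) = [] := by
            apply List.drop_of_length_le
            simp [List.length_take]
          simp [hd, h0, hKs, hKn, htake]

-- B's find? computes fdK
theorem findB_eq (xs : List Int) (n : Nat) (hn : n ≤ xs.length) :
    (PySem.List.pyRange 1 n 1).find?
      (fun i => decide (PySem.List.pyGetD xs i 0 < PySem.List.pyGetD xs (i - 1) 0))
    = (if fdK xs n < n then some ((fdK xs n : Nat) : Int) else none) := by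
  induction n with
  | zero => simp [PySem.List.pyRange_one_eq_nil, fdK]
  | succ n ih =>
    have hn' : n ≤ xs.length := by omega
    have hlt : n < xs.length := by omega
    by_cases h0 : n = 0
    · subst h0
      rw [show ((0 + 1 : Nat) : Int) = 1 by norm_num, PySem.List.pyRange_one_eq_nil (by norm_num)]
      simp [fdK]
    · have h1 : (1 : Int) ≤ (n : Int) := by exact_mod_cast Nat.one_le_iff_ne_zero.mpr h0
      rw [show ((n + 1 : Nat) : Int) = (n : Int) + 1 by push_cast; ring]
      rw [PySem.List.pyRange_one_succ_right h1, List.find?_append, ih hn']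
      have hget : PySem.List.pyGetD xs (n : Int) 0 = xs[n]?.getD 0 := by
        simp [PySem.List.pyGetD_natCast, List.getD_eq_getElem?_getD]
      have hcast : ((n : Int) - 1) = ((n - 1 : Nat) : Int) := by
        have : 1 ≤ n := Nat.one_le_iff_ne_zero.mpr h0
        push_cast [this]; ring
      have hget' : PySem.List.pyGetD xs ((n : Int) - 1) 0 = xs[n - 1]?.getD 0 := by
        rw [hcast]; simp [PySem.List.pyGetD_natCast, List.getD_eq_getElem?_getD]
      by_cases hK : fdK xs n < n
      · have hKs : fdK xs (n + 1) = fdK xs n := by simp [fdK, hK]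
        simp [hK, hKs, lt_of_lt_of_le hK (Nat.le_succ n)]
      · have hKn : fdK xs n = n := fdK_eq_of_not_lt xs n hK
        by_cases hd : xs[n]?.getD 0 < xs[n - 1]?.getD 0
        · have hKs : fdK xs (n + 1) = n := by simp [fdK, hK, h0, hd]
          simp [hK, hKs, List.find?, hget, hget', hd]
        · have hKs : fdK xs (n + 1) = n + 1 := by simp [fdK, hK, h0, hd]
          simp [hK, hKs, List.find?, hget, hget', hd]

-- ===== VERDICT (by name: the statement is the Claim_ definition above) =====
theorem check_timedelta_skip_month_spec : Claim_equal_check_timedelta_skip_month := by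
  intro xs _
  unfold Spec_check_timedelta_skip_month check_timedelta_skip_month check_timedelta_skip_month_alt
  rw [loopA_inv xs xs.length le_rfl, findB_eq xs xs.length le_rfl]
  by_cases hK : fdK xs xs.length < xs.length
  · simp [hK, PySem.List.slice_to_natCast, PySem.List.slice_from_natCast]
  · have hKn := fdK_eq_of_not_lt xs xs.length hK
    simp [hKn, PySem.List.slice_to_natCast, PySem.List.slice_from_natCast]
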